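-- pv_equiv track=rewrite | github.com/pumaphysics/grapple | grapple/metrics.py | collapsehist
-- ===== SOURCE A (Python) =====
-- def collapsehist(histu,histgm):
--     containszero = False
--     for e in histu:
--         if e == 0:
--             containszero = True
--             break
--
--     while containszero:
--         tmp_histu = []
--         tmp_histgm = []
--         endreached = False
--         for e in range(len(histu)):
--             if endreached:
--                 break
--             if e == len(histu)-1 and histu[e] != 0:
--                 tmp_histu.append(histu[e])
--                 tmp_histgm.append(histgm[e])
--                 break
--             elif e == len(histu)-1:
--                 tmp_histgm[-1] += histgm[e]
--                 break
--             if histu[e] == 0: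
--                 for f in range(e+1,len(histu)):
--                     if f == e+1:
--                         tmp_histu.append(histu[e]+histu[f])
--                         tmp_histgm.append(histgm[e]+histgm[f])
--                     else:
--                         tmp_histu.append(histu[f])
--                         tmp_histgm.append(histgm[f])
--                     if f == len(histu)-1:
--                         endreached = True
--                         break
--             else:
--                 tmp_histu.append(histu[e])
--                 tmp_histgm.append(histgm[e])
--
--         histu = tmp_histu
--         histgm = tmp_histgm
--
--         containszero = False
--         for e in histu:
--             if e == 0:
--                 containszero = True
--                 break
--
--     return histu,histgm
-- ===== SOURCE B (Python) =====
-- def collapsehist(histu, histgm):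
--     if 0 not in histu:
--         return histu, histgm  # nothing to collapse
--     # One pass: sums of consecutive zero bins are carried into the
--     # next nonzero bin; a trailing run of zeros is folded into the last bin.
--     out_u, out_gm = [], []
--     carry = 0
--     for u, g in zip(histu, histgm):
--         if u == 0:
--             carry += g
--         else:
--             out_u.append(u)
--             out_gm.append(carry + g)
--             carry = 0
--     if carry:
--         out_gm[-1] += carry
--     return out_u, out_gm
-- ===== Notes on version B (the rewrite author's own statement) =====
-- stated objective: alternative
-- what changed: A repeatedly rescans and rebuilds the whole histogram, removing one zero bin per pass; B does one linear pass that accumulates consecutive zero bins' weights in a carry and flushes it into the next nonzero bin, folding a trailing zero run backward into the last bin (with an early return when there is no zero bin).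
import Mathlib
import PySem

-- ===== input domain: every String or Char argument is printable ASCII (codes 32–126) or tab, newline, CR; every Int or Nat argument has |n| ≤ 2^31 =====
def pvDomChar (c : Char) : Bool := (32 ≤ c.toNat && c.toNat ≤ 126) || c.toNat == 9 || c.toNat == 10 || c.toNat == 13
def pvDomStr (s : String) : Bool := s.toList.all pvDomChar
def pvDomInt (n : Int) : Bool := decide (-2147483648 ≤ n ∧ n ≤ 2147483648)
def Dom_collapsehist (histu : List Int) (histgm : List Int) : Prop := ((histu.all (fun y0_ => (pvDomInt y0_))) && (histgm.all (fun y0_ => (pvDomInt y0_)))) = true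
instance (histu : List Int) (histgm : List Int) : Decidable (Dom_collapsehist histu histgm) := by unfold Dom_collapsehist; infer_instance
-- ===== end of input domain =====

-- B replaces A's repeated merge-one-zero-and-rebuild passes by a single carry-accumulating
-- pass; proved equal on every input where A returns (Pre_ excludes exactly A's IndexErrors).


-- shared primitive: Python's `l[-1] += c` (no-op on [] never reached inside Pre_)
def incLast : List Int → Int → List Int
  | [], _ => []
  | [x], c => [x + c]
  | x :: xs, c => x :: incLast xs c

-- ===== PORT A =====
-- inner `for f in range(e+1, len(histu))` loop; Bool result = `endreached`
def collapsehistInner (histu histgm : List Int) (e : Nat) (f : Nat)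
    (tmpu tmpg : List Int) : List Int × List Int × Bool :=
  if _h : f < histu.length then
    let tmpu' := if f = e + 1 then tmpu ++ [histu.getD e 0 + histu.getD f 0] else tmpu ++ [histu.getD f 0]
    let tmpg' := if f = e + 1 then tmpg ++ [histgm.getD e 0 + histgm.getD f 0] else tmpg ++ [histgm.getD f 0]
    if f = histu.length - 1 then (tmpu', tmpg', true)
    else collapsehistInner histu histgm e (f + 1) tmpu' tmpg'
  else (tmpu, tmpg, false)
termination_by histu.length - f

-- outer `for e in range(len(histu))` loop of one while-iteration
def collapsehistPass (histu histgm : List Int) (e : Nat)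
    (tmpu tmpg : List Int) : List Int × List Int :=
  if _h : e < histu.length then
    if e = histu.length - 1 ∧ histu.getD e 0 ≠ 0 then
      (tmpu ++ [histu.getD e 0], tmpg ++ [histgm.getD e 0])
    else if e = histu.length - 1 then
      (tmpu, incLast tmpg (histgm.getD e 0))
    else if histu.getD e 0 = 0 then
      match collapsehistInner histu histgm e (e + 1) tmpu tmpg with
      | (tu, tg, endreached) =>
        if endreached then (tu, tg) else collapsehistPass histu histgm (e + 1) tu tg
    else
      collapsehistPass histu histgm (e + 1) (tmpu ++ [histu.getD e 0]) (tmpg ++ [histgm.getD e 0])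
  else (tmpu, tmpg)
termination_by histu.length - e

-- the `containszero` scan with break
def containsZero : List Int → Bool
  | [] => false
  | x :: r => if x = 0 then true else containsZero r

-- the `while containszero` loop; fuel is only a totality guard: each pass removes one
-- zero bin, so length+1 passes always suffice on the inputs admitted by Pre_.
def collapsehistWhile : Nat → List Int → List Int → List Int × List Int
  | 0, u, g => (u, g)
  | fuel + 1, u, g =>
    if containsZero u then
      match collapsehistPass u g 0 [] [] with
      | (u', g') => collapsehistWhile fuel u' g'
    else (u, g)

def collapsehist (histu : List Int) (histgm : List Int) : List Int × List Int :=
  collapsehistWhile (histu.length + 1) histu histgm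

-- ===== PORT B =====
-- one pass over zip(histu, histgm) with carry of consecutive zero bins' weights
def collapsehistAltGo (pairs : List (Int × Int)) (outu outg : List Int) (carry : Int) :
    List Int × List Int × Int :=
  match pairs with
  | [] => (outu, outg, carry)
  | (u, g) :: rest =>
    if u = 0 then collapsehistAltGo rest outu outg (carry + g)
    else collapsehistAltGo rest (outu ++ [u]) (outg ++ [carry + g]) 0

def collapsehistAltCollapse (histu : List Int) (histgm : List Int) : List Int × List Int :=
  match collapsehistAltGo (histu.zip histgm) [] [] 0 with
  | (outu, outg, carry) => if carry ≠ 0 then (outu, incLast outg carry) else (outu, outg)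

def collapsehist_alt (histu : List Int) (histgm : List Int) : List Int × List Int :=
  if (0 : Int) ∉ histu then (histu, histgm)
  else collapsehistAltCollapse histu histgm

-- ===== PRECONDITION & SPEC =====
-- Pre_ excludes exactly the inputs on which A raises IndexError: a zero bin present while
-- histgm is shorter than histu, or an all-zero nonempty histu (B also raises on the latter).
def Pre_collapsehist (histu : List Int) (histgm : List Int) : Prop :=
  (0 : Int) ∈ histu → (histu.length ≤ histgm.length ∧ ∃ x ∈ histu, x ≠ 0)
instance (histu : List Int) (histgm : List Int) : Decidable (Pre_collapsehist histu histgm) := by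
  unfold Pre_collapsehist; infer_instance

def pvWitness_collapsehist : List Int × List Int := ([1, 0, 0, 2, 0], [3, 4, 5, 6, 7])

def Spec_collapsehist (histu : List Int) (histgm : List Int) (out : List Int × List Int) : Prop := out = collapsehist_alt histu histgm
instance (histu : List Int) (histgm : List Int) (out : List Int × List Int) : Decidable (Spec_collapsehist histu histgm out) := by unfold Spec_collapsehist; infer_instance

-- ===== CLAIM (what is proved, stated in full; the proofs are below) =====
def Claim_equal_collapsehist : Prop := ∀ (histu : List Int) (histgm : List Int), Dom_collapsehist histu histgm → Pre_collapsehist histu histgm → Spec_collapsehist histu histgm (collapsehist histu histgm)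

-- ===== LEMMAS AND PROOFS =====

theorem incLast_zero (l : List Int) : incLast l 0 = l := by
  induction l with
  | nil => rfl
  | cons x xs ih => cases xs with
    | nil => simp [incLast]
    | cons y ys => simpa [incLast] using ih

theorem goB_merge :
    ∀ (l1 : List (Int × Int)) ou og c g0 x gx l2,
      collapsehistAltGo (l1 ++ (0, g0) :: (x, gx) :: l2) ou og c =
        collapsehistAltGo (l1 ++ (x, g0 + gx) :: l2) ou og c := by
  intro l1
  induction l1 with
  | nil =>
    intro ou og c g0 x gx l2
    by_cases hx : x = 0 <;> simp [collapsehistAltGo, hx, add_assoc]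
  | cons p l1 ih =>
    intro ou og c g0 x gx l2
    obtain ⟨a, b⟩ := p
    by_cases ha : a = 0 <;> simp [collapsehistAltGo, ha, ih]

theorem goB_prefix :
    ∀ (p gp : List Int), (∀ x ∈ p, x ≠ 0) → p.length = gp.length →
      ∀ rest ou og, collapsehistAltGo (p.zip gp ++ rest) ou og 0 =
        collapsehistAltGo rest (ou ++ p) (og ++ gp) 0 := by
  intro p
  induction p with
  | nil =>
    intro gp _ hlen rest ou og
    cases gp with
    | nil => simp
    | cons y gp => simp at hlen
  | cons x p ih =>
    intro gp hp hlen rest ou og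
    cases gp with
    | nil => simp at hlen
    | cons y gp =>
      have hx : x ≠ 0 := hp x (by simp)
      simp only [List.zip_cons_cons, List.cons_append, collapsehistAltGo, if_neg hx]
      rw [zero_add, ih gp (fun z hz => hp z (List.mem_cons_of_mem _ hz)) (by simpa using hlen) rest (ou ++ [x]) (og ++ [y])]
      simp

theorem alt_nozero (u g : List Int) (h : ∀ x ∈ u, x ≠ 0) (hlen : u.length = g.length) :
    collapsehistAltCollapse u g = (u, g) := by
  unfold collapsehistAltCollapse
  have := goB_prefix u g h hlen [] [] []
  simp at this
  rw [this]
  simp [collapsehistAltGo]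

theorem alt_merge (p gp : List Int) (hlen : p.length = gp.length) (x g0 gx : Int) (s gs : List Int) :
    collapsehistAltCollapse (p ++ 0 :: x :: s) (gp ++ g0 :: gx :: gs) =
      collapsehistAltCollapse (p ++ x :: s) (gp ++ (g0 + gx) :: gs) := by
  unfold collapsehistAltCollapse
  rw [List.zip_append hlen, List.zip_append hlen]
  simp only [List.zip_cons_cons]
  rw [goB_merge]

theorem alt_trailing (p gp : List Int) (hp : ∀ x ∈ p, x ≠ 0) (hlen : p.length = gp.length) (g0 : Int) :
    collapsehistAltCollapse (p ++ [0]) (gp ++ [g0]) = (p, incLast gp g0) := by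
  unfold collapsehistAltCollapse
  rw [List.zip_append hlen]
  simp only [List.zip_cons_cons, List.zip_nil_right]
  rw [goB_prefix p gp hp hlen]
  by_cases hg : g0 = 0 <;> simp [collapsehistAltGo, hg, incLast_zero]
def pStruct : List Int → List Int → List Int → List Int → List Int × List Int
  | [x], [y], tu, tg => if x ≠ 0 then (tu ++ [x], tg ++ [y]) else (tu, incLast tg y)
  | x :: x2 :: ru, y :: y2 :: rg, tu, tg =>
    if x = 0 then (tu ++ (x + x2) :: ru, tg ++ (y + y2) :: rg)
    else pStruct (x2 :: ru) (y2 :: rg) (tu ++ [x]) (tg ++ [y])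
  | _, _, tu, tg => (tu, tg)

theorem drop_cons_getD (u : List Int) (f : Nat) (h : f < u.length) :
    u.drop f = u.getD f 0 :: u.drop (f + 1) := by
  rw [List.getD_eq_getElem u 0 h]
  exact List.drop_eq_getElem_cons h

theorem inner_tail (u g : List Int) (e : Nat) (hlen : u.length = g.length) :
    ∀ f tu tg, e + 1 < f → f < u.length →
      collapsehistInner u g e f tu tg = (tu ++ u.drop f, tg ++ g.drop f, true) := by
  suffices H : ∀ n f tu tg, u.length - f = n → e + 1 < f → f < u.length →
      collapsehistInner u g e f tu tg = (tu ++ u.drop f, tg ++ g.drop f, true) by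
    intro f tu tg h1 h2; exact H _ f tu tg rfl h1 h2
  intro n
  induction n with
  | zero => intro f tu tg hn h1 h2; omega
  | succ n ih =>
    intro f tu tg hn h1 h2
    rw [collapsehistInner]
    simp only [dif_pos h2, if_neg (by omega : ¬ f = e + 1)]
    by_cases hlast : f = u.length - 1
    · rw [if_pos hlast]
      rw [drop_cons_getD u f h2, drop_cons_getD g f (by omega)]
      rw [List.drop_eq_nil_of_le (by omega), List.drop_eq_nil_of_le (by omega)]
    · rw [if_neg hlast]
      rw [ih (f + 1) _ _ (by omega) (by omega) (by omega)]
      rw [drop_cons_getD u f h2, drop_cons_getD g f (by omega)]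
      simp

theorem inner_first (u g : List Int) (e : Nat) (hlen : u.length = g.length)
    (h : e + 1 < u.length) (tu tg : List Int) :
    collapsehistInner u g e (e + 1) tu tg =
      (tu ++ (u.getD e 0 + u.getD (e + 1) 0) :: u.drop (e + 2),
       tg ++ (g.getD e 0 + g.getD (e + 1) 0) :: g.drop (e + 2), true) := by
  rw [collapsehistInner]
  simp only [dif_pos h, if_pos rfl]
  by_cases hlast : e + 1 = u.length - 1
  · rw [if_pos hlast]
    rw [List.drop_eq_nil_of_le (by omega : u.length ≤ e + 2),
        List.drop_eq_nil_of_le (by omega : g.length ≤ e + 2)]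
    simp
  · rw [if_neg hlast]
    rw [inner_tail u g e hlen (e + 2) _ _ (by omega) (by omega)]
    simp

theorem pass_eq (u g : List Int) (hlen : u.length = g.length) :
    ∀ e tu tg, collapsehistPass u g e tu tg = pStruct (u.drop e) (g.drop e) tu tg := by
  suffices H : ∀ n e tu tg, u.length - e = n →
      collapsehistPass u g e tu tg = pStruct (u.drop e) (g.drop e) tu tg by
    intro e tu tg; exact H _ e tu tg rfl
  intro n
  induction n with
  | zero =>
    intro e tu tg hn
    rw [collapsehistPass]
    rw [dif_neg (by omega : ¬ e < u.length)]
    rw [List.drop_eq_nil_of_le (by omega), List.drop_eq_nil_of_le (by omega)]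
    rfl
  | succ n ih =>
    intro e tu tg hn
    have he : e < u.length := by omega
    rw [collapsehistPass]
    rw [dif_pos he]
    simp only [List.getD] at *
    by_cases hlast : e = u.length - 1
    · have hdu : List.drop e u = [u[e]?.getD 0] := by
        rw [drop_cons_getD u e he, List.drop_eq_nil_of_le (by omega)]; rfl
      have hdg : List.drop e g = [g[e]?.getD 0] := by
        rw [drop_cons_getD g e (by omega), List.drop_eq_nil_of_le (by omega)]; rfl
      by_cases hz : u[e]?.getD 0 = 0
      · rw [if_neg (by simp [hz]), if_pos hlast, hdu, hdg]
        simp [pStruct, hz]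
      · rw [if_pos ⟨hlast, hz⟩, hdu, hdg]
        simp [pStruct, hz]
    · have hdu : List.drop e u = u[e]?.getD 0 :: u[e+1]?.getD 0 :: List.drop (e + 2) u := by
        rw [drop_cons_getD u e he, drop_cons_getD u (e+1) (by omega)]; rfl
      have hdg : List.drop e g = g[e]?.getD 0 :: g[e+1]?.getD 0 :: List.drop (e + 2) g := by
        rw [drop_cons_getD g e (by omega), drop_cons_getD g (e+1) (by omega)]; rfl
      by_cases hz : u[e]?.getD 0 = 0
      · rw [if_neg (by simp [hlast]), if_neg hlast, if_pos hz]
        rw [inner_first u g e hlen (by omega) tu tg]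
        rw [hdu, hdg]
        simp [pStruct, hz, List.getD]
      · rw [if_neg (by simp [hlast]), if_neg hlast, if_neg hz]
        rw [ih (e+1) _ _ (by omega)]
        rw [hdu, hdg, drop_cons_getD u (e+1) (by omega), drop_cons_getD g (e+1) (by omega)]
        simp [pStruct, hz, List.getD]

theorem pStruct_skip :
    ∀ (p gp : List Int), (∀ x ∈ p, x ≠ 0) → p.length = gp.length →
      ∀ r gr tu tg, r ≠ [] → gr ≠ [] →
        pStruct (p ++ r) (gp ++ gr) tu tg = pStruct r gr (tu ++ p) (tg ++ gp) := by
  intro p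
  induction p with
  | nil =>
    intro gp _ hlen r gr tu tg _ _
    cases gp with
    | nil => simp
    | cons y gp => simp at hlen
  | cons x p ih =>
    intro gp hp hlen r gr tu tg hr hgr
    cases gp with
    | nil => simp at hlen
    | cons y gp =>
      have hx : x ≠ 0 := hp x (by simp)
      obtain ⟨z, t, hz⟩ := List.exists_cons_of_ne_nil (show p ++ r ≠ [] by simp [hr])
      obtain ⟨w, s, hw⟩ := List.exists_cons_of_ne_nil (show gp ++ gr ≠ [] by simp [hgr])
      simp only [List.cons_append]
      rw [hz, hw]
      rw [pStruct]
      rw [if_neg hx, ← hz, ← hw]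
      rw [ih gp (fun a ha => hp a (List.mem_cons_of_mem _ ha)) (by simpa using hlen) r gr _ _ hr hgr]
      simp
theorem incLast_length (l : List Int) (c : Int) : (incLast l c).length = l.length := by
  induction l with
  | nil => rfl
  | cons x xs ih => cases xs with
    | nil => simp [incLast]
    | cons y ys => simpa [incLast] using ih

theorem containsZero_iff (u : List Int) : containsZero u = true ↔ (0 : Int) ∈ u := by
  induction u with
  | nil => simp [containsZero]
  | cons x r ih =>
    by_cases hx : x = 0 <;> simp [containsZero, hx, ih, eq_comm]

theorem exists_first_zero (u : List Int) (h : (0 : Int) ∈ u) :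
    ∃ p r, u = p ++ 0 :: r ∧ ∀ x ∈ p, x ≠ 0 := by
  induction u with
  | nil => simp at h
  | cons x u' ih =>
    by_cases hx : x = 0
    · exact ⟨[], u', by simp [hx], by simp⟩
    · rcases ih (by simpa [eq_comm, hx] using h) with ⟨p, r, hu, hp⟩
      exact ⟨x :: p, r, by simp [hu], by simpa [hx] using hp⟩

theorem while_eq :
    ∀ fuel (u g : List Int), u.length = g.length → ((0 : Int) ∈ u → ∃ x ∈ u, x ≠ 0) →
      u.count 0 ≤ fuel → collapsehistWhile fuel u g = collapsehistAltCollapse u g := by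
  intro fuel
  induction fuel with
  | zero =>
    intro u g hlen hinv hc
    have h0 : (0 : Int) ∉ u := List.count_eq_zero.mp (Nat.le_zero.mp hc)
    exact (alt_nozero u g (fun x hx hx0 => h0 (hx0 ▸ hx)) hlen).symm
  | succ fuel ih =>
    intro u g hlen hinv hc
    rw [collapsehistWhile]
    by_cases h0 : (0 : Int) ∈ u
    · rw [if_pos ((containsZero_iff u).mpr h0)]
      obtain ⟨p, r, hu, hp⟩ := exists_first_zero u h0
      have hk : p.length < g.length := by
        rw [← hlen, hu]; simp
      have hgsplit : g = g.take p.length ++ g.getD p.length 0 :: g.drop (p.length + 1) := by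
        rw [← drop_cons_getD g p.length hk, List.take_append_drop]
      have hglen : (g.take p.length).length = p.length := by
        simp [Nat.le_of_lt hk]
      have hpass : collapsehistPass u g 0 [] [] =
          pStruct (0 :: r) (g.getD p.length 0 :: g.drop (p.length + 1)) p (g.take p.length) := by
        rw [pass_eq u g hlen 0 [] [], List.drop_zero, List.drop_zero]
        conv_lhs => rw [hu, hgsplit]
        rw [pStruct_skip p (g.take p.length) hp hglen.symm _ _ [] [] (by simp) (by simp)]
        simp
      rw [hpass]
      cases r with
      | nil =>
        have hgr : g.drop (p.length + 1) = [] :=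
          List.drop_eq_nil_of_le (by rw [← hlen, hu]; simp)
        have hpz : (0 : Int) ∉ p := fun hmem => hp 0 hmem rfl
        rw [hgr]
        have hps : pStruct [0] [g.getD p.length 0] p (List.take p.length g)
            = (p, incLast (List.take p.length g) (g.getD p.length 0)) := by
          simp [pStruct]
        rw [hps]
        show collapsehistWhile fuel p (incLast (List.take p.length g) (g.getD p.length 0)) = collapsehistAltCollapse u g
        rw [ih p (incLast (g.take p.length) (g.getD p.length 0))
          (by rw [incLast_length, hglen])
          (fun hmem => absurd hmem hpz)
          (by simp [List.count_eq_zero.mpr hpz])]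
        rw [alt_nozero p _ hp (by rw [incLast_length, hglen])]
        conv_rhs => rw [hu, hgsplit, hgr]
        rw [alt_trailing p (g.take p.length) hp hglen.symm (g.getD p.length 0)]
      | cons x s =>
        have hk2 : p.length + 1 < g.length := by
          rw [← hlen, hu]; simp only [List.length_append, List.length_cons]; omega
        have hgr : g.drop (p.length + 1) = g.getD (p.length + 1) 0 :: g.drop (p.length + 2) :=
          drop_cons_getD g (p.length + 1) hk2
        rw [hgr]
        simp only [pStruct, if_pos rfl, zero_add]
        have hslen : s.length = (g.drop (p.length + 2)).length := by
          have h1 : u.length = g.length := hlen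
          rw [hu] at h1
          simp only [List.length_append, List.length_cons, List.length_drop] at h1 ⊢
          omega
        have hlen' : (p ++ x :: s).length =
            ((g.take p.length) ++ (g.getD p.length 0 + g.getD (p.length + 1) 0) :: g.drop (p.length + 2)).length := by
          simp only [List.length_append, List.length_cons]
          omega
        have hinv' : (0 : Int) ∈ p ++ x :: s → ∃ y ∈ p ++ x :: s, y ≠ 0 := by
          intro _
          obtain ⟨z, hzmem, hznz⟩ := hinv h0
          rw [hu] at hzmem
          rcases List.mem_append.mp hzmem with hzp | hzr
          · exact ⟨z, List.mem_append.mpr (Or.inl hzp), hznz⟩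
          · rcases List.mem_cons.mp hzr with h | h
            · exact absurd h hznz
            · exact ⟨z, List.mem_append.mpr (Or.inr h), hznz⟩
        have hc' : (p ++ x :: s).count 0 ≤ fuel := by
          rw [hu] at hc
          simp [List.count_append, List.count_cons] at hc ⊢
          by_cases hx : x = 0
          · simp [hx] at hc ⊢; omega
          · simp [hx] at hc ⊢; omega
        show collapsehistWhile fuel (p ++ x :: s)
            ((g.take p.length) ++ (g.getD p.length 0 + g.getD (p.length + 1) 0) :: g.drop (p.length + 2)) = collapsehistAltCollapse u g
        rw [ih _ _ hlen' hinv' hc']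
        conv_rhs => rw [hu, hgsplit, hgr]
        exact (alt_merge p (g.take p.length) hglen.symm x (g.getD p.length 0) (g.getD (p.length + 1) 0) s (g.drop (p.length + 2))).symm
    · rw [if_neg (by simp [Ne, ← containsZero_iff] at h0 ⊢; simp [h0])]
      exact (alt_nozero u g (fun x hx hx0 => h0 (hx0 ▸ hx)) hlen).symm

theorem getD_take (g : List Int) (n i : Nat) (h : i < n) : (g.take n).getD i 0 = g.getD i 0 := by
  simp [List.getD, h]

theorem zip_take (u g : List Int) : u.zip g = u.zip (g.take u.length) := by
  induction u generalizing g with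
  | nil => simp
  | cons x u ih =>
    cases g with
    | nil => simp
    | cons y g =>
      simp only [List.length_cons, List.take_succ_cons, List.zip_cons_cons]
      exact congrArg _ (ih g)

theorem inner_take (u g : List Int) (e : Nat) :
    ∀ f tu tg, collapsehistInner u g e f tu tg = collapsehistInner u (g.take u.length) e f tu tg := by
  suffices H : ∀ n f tu tg, u.length - f = n →
      collapsehistInner u g e f tu tg = collapsehistInner u (g.take u.length) e f tu tg by
    intro f tu tg; exact H _ f tu tg rfl
  intro n
  induction n with
  | zero =>
    intro f tu tg hn
    rw [collapsehistInner, collapsehistInner, dif_neg (by omega : ¬ f < u.length),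
        dif_neg (by omega : ¬ f < u.length)]
  | succ n ih =>
    intro f tu tg hn
    have hf : f < u.length := by omega
    rw [collapsehistInner, collapsehistInner]
    simp only [dif_pos hf]
    by_cases hfe : f = e + 1
    · simp only [if_pos hfe, getD_take g u.length f hf,
        getD_take g u.length e (show e < u.length by omega)]
      by_cases hl : f = u.length - 1
      · simp only [if_pos hl]
      · simp only [if_neg hl]; exact ih (f + 1) _ _ (by omega)
    · simp only [if_neg hfe, getD_take g u.length f hf]
      by_cases hl : f = u.length - 1
      · simp only [if_pos hl]
      · simp only [if_neg hl]; exact ih (f + 1) _ _ (by omega)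

theorem pass_take (u g : List Int) :
    ∀ e tu tg, collapsehistPass u g e tu tg = collapsehistPass u (g.take u.length) e tu tg := by
  suffices H : ∀ n e tu tg, u.length - e = n →
      collapsehistPass u g e tu tg = collapsehistPass u (g.take u.length) e tu tg by
    intro e tu tg; exact H _ e tu tg rfl
  intro n
  induction n with
  | zero =>
    intro e tu tg hn
    conv_lhs => rw [collapsehistPass]
    conv_rhs => rw [collapsehistPass]
    rw [dif_neg (by omega : ¬ e < u.length), dif_neg (by omega : ¬ e < u.length)]
  | succ n ih =>
    intro e tu tg hn
    have he : e < u.length := by omega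
    conv_lhs => rw [collapsehistPass]
    conv_rhs => rw [collapsehistPass]
    simp only [dif_pos he, getD_take g u.length e he]
    by_cases hlast : e = u.length - 1
    · by_cases hz : u.getD e 0 = 0
      · simp only [if_neg (show ¬ (e = u.length - 1 ∧ u.getD e 0 ≠ 0) from fun h => h.2 hz),
          if_pos hlast]
      · simp only [if_pos (show e = u.length - 1 ∧ u.getD e 0 ≠ 0 from ⟨hlast, hz⟩)]
    · by_cases hz : u.getD e 0 = 0
      · simp only [if_neg (show ¬ (e = u.length - 1 ∧ u.getD e 0 ≠ 0) from fun h => hlast h.1),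
          if_neg hlast, if_pos hz, ← inner_take u g e (e + 1) tu tg]
        rcases _hres : collapsehistInner u g e (e + 1) tu tg with ⟨tu', tg', endr⟩
        cases endr with
        | true => rfl
        | false => exact ih (e + 1) _ _ (by omega)
      · simp only [if_neg (show ¬ (e = u.length - 1 ∧ u.getD e 0 ≠ 0) from fun h => hlast h.1),
          if_neg hlast, if_neg hz]
        exact ih (e + 1) _ _ (by omega)

-- ===== VERDICT (by name: the statement is the Claim_ definition above) =====
theorem collapsehist_spec : Claim_equal_collapsehist := by
  intro u g _ hpre
  unfold Spec_collapsehist collapsehist collapsehist_alt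
  by_cases h0 : (0 : Int) ∈ u
  · obtain ⟨hle, hnz⟩ := hpre h0
    have hcz : containsZero u = true := (containsZero_iff u).mpr h0
    have hlen' : u.length = (g.take u.length).length := by
      simp [List.length_take]; omega
    have hstep : collapsehistWhile (u.length + 1) u g =
        collapsehistWhile (u.length + 1) u (g.take u.length) := by
      rw [collapsehistWhile, collapsehistWhile, if_pos hcz, if_pos hcz, pass_take u g]
    rw [hstep, while_eq (u.length + 1) u (g.take u.length) hlen' (fun _ => hnz)
      (le_trans List.count_le_length (Nat.le_succ _))]
    rw [if_neg (by simpa using h0)]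
    unfold collapsehistAltCollapse
    rw [← zip_take]
  · rw [if_pos h0]
    rw [collapsehistWhile, if_neg (fun h => h0 ((containsZero_iff u).mp h))]
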